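-- pv_equiv track=rewrite | github.com/dannyk1003/2022_python_course | mine/counter3.1.py | is_operator_double
-- ===== SOURCE A (Python) =====
-- def operator_counter(formula):
--     '''
--     判斷哪幾個是運算元;
--     x = formula;
--     return = list[ ]
--     '''
--     op_counter = []
--     for i, formula_element in enumerate(list(formula)):
--         #enumerate 將內容編號 [(0, "A"), (1, "B"), (2, "C")...]
--         if is_operator(formula_element):
--             op_counter.append(i)
--     return op_counter
--
-- def is_operator(formula_element):
--     '''
--     判斷是否為運算元
--     '''
--     if formula_element == "+":
--         return True
--     elif formula_element == "-":
--         return True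
--     elif formula_element == "*":
--         return True
--     elif formula_element == "/":
--         return True
--     #elif formula_element == "=":
--     #    return True
--     else:
--         return False
--
-- def operator_list(formula): # x = operator_count [3, 6], y = formula
--     '''
--     運算原有哪些(加順序)
--     '''
--     op_counter = operator_counter(formula)
--     op_list = []
--     formula_list = list(formula)
--     for i in op_counter:
--         op_list.append(formula_list[i])
--
--     return op_list #["+","+"]
--
-- def is_operator_double(formula): #[3,6]
--     '''
--     判斷是否有連續的運算元
--     '''
--     op_counter = operator_counter(formula)
--     op_list = operator_list(formula)
--     for i in range(len(op_counter)-1):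
--         if op_counter[i+1] - op_counter[i] == 1: # 運算原相鄰
--             if op_list[i+1] != "(" or  op_list[i] != ")": # 如果相鄰的不是括號則回傳False
--                 return False
--     return True
-- ===== SOURCE B (Python) =====
-- def is_operator(formula_element):
--     return formula_element in "+-*/"
--
-- def is_operator_double(formula):
--     chars = list(formula)
--     return not any(is_operator(a) and is_operator(b)
--                    for a, b in zip(chars, chars[1:]))
-- ===== Notes on version B (the rewrite author's own statement) =====
-- stated objective: simpler
-- what changed: Replaces the build-two-index-lists-then-compare-index-differences strategy (operator_counter/operator_list plus a dead parenthesis branch) with a single adjacent-pair scan over the characters.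
import Mathlib
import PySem

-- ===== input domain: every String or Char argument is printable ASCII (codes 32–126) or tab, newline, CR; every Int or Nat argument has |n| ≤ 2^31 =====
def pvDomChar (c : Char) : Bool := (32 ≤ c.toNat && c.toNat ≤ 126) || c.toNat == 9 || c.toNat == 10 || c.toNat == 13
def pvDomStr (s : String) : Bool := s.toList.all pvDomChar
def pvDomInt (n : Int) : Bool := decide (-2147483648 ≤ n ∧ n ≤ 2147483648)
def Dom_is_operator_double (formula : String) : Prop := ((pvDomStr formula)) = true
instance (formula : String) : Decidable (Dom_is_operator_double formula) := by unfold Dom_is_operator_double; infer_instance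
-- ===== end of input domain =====

-- B replaces A's two index lists + index-difference comparison by a single adjacent-pair scan (simpler; return value only).


-- ===== PORT A =====
def is_operator (formula_element : Char) : Bool :=
  if formula_element = '+' then true
  else if formula_element = '-' then true
  else if formula_element = '*' then true
  else if formula_element = '/' then true
  else false

def operator_counter (formula : String) : List Int :=
  (PySem.List.enumerate formula.toList 0).foldl
    (fun op_counter p => if is_operator p.2 then op_counter ++ [p.1] else op_counter) []

-- formula_list[i]: i always comes from enumerate, hence in range; pyGetD is exact here
def operator_list (formula : String) : List Char :=
  let op_counter := operator_counter formula
  let formula_list := formula.toList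
  op_counter.foldl (fun op_list i => op_list ++ [PySem.List.pyGetD formula_list i ' ']) []

def is_operator_double (formula : String) : Bool :=
  let op_counter := operator_counter formula
  let op_list := operator_list formula
  (PySem.List.pyRange 0 ((op_counter.length : Int) - 1) 1).all (fun i =>
    !((PySem.List.pyGetD op_counter (i + 1) 0 - PySem.List.pyGetD op_counter i 0 == 1) &&
      (PySem.List.pyGetD op_list (i + 1) ' ' != '(' || PySem.List.pyGetD op_list i ' ' != ')')))

-- ===== PORT B =====
-- 'formula_element in "+-*/"': membership in the string's characters
def is_operator_b (formula_element : Char) : Bool :=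
  ['+', '-', '*', '/'].contains formula_element

def is_operator_double_alt (formula : String) : Bool :=
  let chars := formula.toList
  !((chars.zip (chars.drop 1)).any (fun p => is_operator_b p.1 && is_operator_b p.2))

-- ===== PRECONDITION & SPEC =====
def Spec_is_operator_double (formula : String) (out : Bool) : Prop := out = is_operator_double_alt formula
instance (formula : String) (out : Bool) : Decidable (Spec_is_operator_double formula out) := by unfold Spec_is_operator_double; infer_instance

-- ===== CLAIM (what is proved, stated in full; the proofs are below) =====
def Claim_equal_is_operator_double : Prop := ∀ (formula : String), Dom_is_operator_double formula → Spec_is_operator_double formula (is_operator_double formula)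

-- ===== LEMMAS AND PROOFS =====

/-- The (index, char) pairs of the operator occurrences, starting at offset `k`. -/
def opPairs : List Char → Int → List (Int × Char)
  | [], _ => []
  | c :: t, k => if is_operator c then (k, c) :: opPairs t (k + 1) else opPairs t (k + 1)

/-- A's loop, run structurally on the paired lists. -/
def aChain : List (Int × Char) → Bool
  | p :: q :: rest =>
      if (q.1 - p.1 == 1) && (q.2 != '(' || p.2 != ')') then false else aChain (q :: rest)
  | _ => true

theorem enum_filter_eq_opPairs (xs : List Char) (k : Int) :
    (PySem.List.enumerate xs k).filter (fun p => is_operator p.2) = opPairs xs k := by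
  induction xs generalizing k with
  | nil => simp [PySem.List.enumerate_nil, opPairs]
  | cons c t ih =>
      simp only [PySem.List.enumerate_cons, List.filter_cons, opPairs]
      by_cases h : is_operator c = true <;> simp [h, ih]

theorem operator_counter_eq (f : String) :
    operator_counter f = (opPairs f.toList 0).map Prod.fst := by
  unfold operator_counter
  rw [PySem.List.foldl_append_if, enum_filter_eq_opPairs]
  simp

theorem mem_opPairs (xs : List Char) (s : Int) (p : Int × Char) (hp : p ∈ opPairs xs s) :
    ∃ j : Nat, ∃ h : j < xs.length, p.1 = s + j ∧ p.2 = xs[j] ∧ is_operator p.2 = true := by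
  induction xs generalizing s with
  | nil => simp [opPairs] at hp
  | cons c t ih =>
      simp only [opPairs] at hp
      by_cases hc : is_operator c = true
      · simp only [hc, if_true, List.mem_cons] at hp
        rcases hp with rfl | hp
        · exact ⟨0, by simp, by simp, by simp, hc⟩
        · rcases ih (s + 1) hp with ⟨j, hj, h1, h2, h3⟩
          exact ⟨j + 1, by simp; omega, by push_cast; omega, by simpa using h2, h3⟩
      · simp only [hc] at hp
        rcases ih (s + 1) hp with ⟨j, hj, h1, h2, h3⟩
        exact ⟨j + 1, by simp; omega, by push_cast; omega, by simpa using h2, h3⟩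

theorem operator_list_eq (f : String) :
    operator_list f = (opPairs f.toList 0).map Prod.snd := by
  unfold operator_list
  rw [PySem.List.foldl_append_singleton_eq_map, operator_counter_eq, List.map_map]
  simp only [List.nil_append]
  apply List.map_congr_left
  intro p hp
  rcases mem_opPairs f.toList 0 p hp with ⟨j, hj, h1, h2, _⟩
  simp only [Function.comp_apply, h1, zero_add]
  rw [PySem.List.pyGetD_natCast]
  simp [List.getD_eq_getElem?_getD, List.getElem?_eq_getElem hj, h2]

theorem opPairs_head_ge (xs : List Char) (s : Int) (p : Int × Char)
    (h : (opPairs xs s).head? = some p) : s ≤ p.1 := by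
  induction xs generalizing s with
  | nil => simp [opPairs] at h
  | cons c t ih =>
      simp only [opPairs] at h
      by_cases hc : is_operator c = true
      · simp only [hc, if_true, List.head?_cons] at h
        obtain rfl := Option.some_inj.mp h
        simp
      · simp only [hc] at h
        have := ih (s + 1) h; omega

theorem op_ne_paren (c : Char) (h : is_operator c = true) :
    (c != '(') = true ∧ (c != ')') = true := by
  unfold is_operator at h
  split_ifs at h with h1 h2 h3 h4 <;> subst_vars <;> simp_all

theorem is_operator_b_eq (c : Char) : is_operator_b c = is_operator c := by
  simp only [is_operator_b, is_operator]
  by_cases h1 : c = '+' <;> by_cases h2 : c = '-' <;> by_cases h3 : c = '*' <;>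
    by_cases h4 : c = '/' <;> simp_all

theorem pyGetD_cons_one {α : Type} (a b : α) (l : List α) (d : α) :
    PySem.List.pyGetD (a :: b :: l) (0 + 1) d = b := by
  have h : (0:Int) ≤ (l.length:Int) + 1 := by positivity
  simp [PySem.List.pyGetD, PySem.List.pyGet?, PySem.List.pyIdx?]

theorem pyGetD_cons_succ' {α : Type} (x : α) (xs : List α) (i : Int) (h : 0 ≤ i) (d : α) :
    PySem.List.pyGetD (x :: xs) (i + 1) d = PySem.List.pyGetD xs i d := by
  obtain ⟨n, rfl⟩ := Int.eq_ofNat_of_zero_le h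
  rw [show ((n : Int) + 1) = ((n + 1 : Nat) : Int) by push_cast; ring,
      PySem.List.pyGetD_natCast, PySem.List.pyGetD_natCast]
  simp

theorem all_congr_mem {α : Type} (L : List α) (f g : α → Bool) (h : ∀ x ∈ L, f x = g x) :
    L.all f = L.all g := by
  induction L with
  | nil => rfl
  | cons a t ih =>
      simp only [List.all_cons, h a (by simp), ih (fun x hx => h x (by simp [hx]))]

theorem all_pyRange_shift (g : Int → Bool) (n : Nat) :
    (PySem.List.pyRange 1 ((n : Int) + 1) 1).all g
      = (PySem.List.pyRange 0 (n : Int) 1).all (fun i => g (i + 1)) := by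
  rw [PySem.List.pyRange_one 1, PySem.List.pyRange_one 0, List.all_map, List.all_map]
  rw [show ((n : Int) + 1 - 1).toNat = ((n : Int) - 0).toNat by omega]
  apply all_congr_mem
  intro k _
  simp only [Function.comp_apply]
  have : (1 : Int) + (k : Int) = 0 + (k : Int) + 1 := by ring
  rw [this]

/-- A's indexed range-loop over the two projected lists equals the structural walk `aChain`. -/
theorem allRange_eq_aChain (l : List (Int × Char)) :
    (PySem.List.pyRange 0 ((l.length : Int) - 1) 1).all (fun i =>
      !((PySem.List.pyGetD (l.map Prod.fst) (i + 1) 0 - PySem.List.pyGetD (l.map Prod.fst) i 0 == 1) &&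
        (PySem.List.pyGetD (l.map Prod.snd) (i + 1) ' ' != '(' || PySem.List.pyGetD (l.map Prod.snd) i ' ' != ')')))
    = aChain l := by
  induction l with
  | nil => simp [aChain, PySem.List.pyRange_one_eq_nil]
  | cons p l ih =>
      cases l with
      | nil => simp [aChain, PySem.List.pyRange_one_eq_nil]
      | cons q rest =>
          rw [PySem.List.pyRange_one_cons (by simp only [List.length_cons]; push_cast; omega), List.all_cons]
          have hA : aChain (p :: q :: rest)
              = (!((q.1 - p.1 == 1) && (q.2 != '(' || p.2 != ')')) && aChain (q :: rest)) := by
            simp only [aChain]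
            by_cases hc : ((q.1 - p.1 == 1) && (q.2 != '(' || p.2 != ')')) = true <;> simp [hc]
          rw [hA, ← ih]
          congr 1
          · simp only [List.map_cons, PySem.List.pyGetD_zero_cons, pyGetD_cons_one]
          · rw [show ((0 : Int) + 1) = 1 by norm_num,
                show (((p :: q :: rest).length : Int) - 1) = ((rest.length + 1 : Nat) : Int) by
                  simp only [List.length_cons]; push_cast; ring,
                show (((q :: rest).length : Int) - 1) = ((rest.length : Nat) : Int) by
                  simp only [List.length_cons]; push_cast; ring]
            rw [show (((rest.length + 1 : Nat)) : Int) = ((rest.length : Nat) : Int) + 1 by push_cast; ring]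
            rw [all_pyRange_shift]
            apply all_congr_mem
            intro i hi
            have hi0 : 0 ≤ i := by
              have := (PySem.List.mem_pyRange_one.mp hi).1; omega
            simp only [List.map_cons]
            rw [pyGetD_cons_succ' p.1 _ (i + 1) (by omega), pyGetD_cons_succ' p.1 _ i hi0,
                pyGetD_cons_succ' p.2 _ (i + 1) (by omega), pyGetD_cons_succ' p.2 _ i hi0]

theorem aChain_opPairs_eq_scan (xs : List Char) (k : Int) :
    aChain (opPairs xs k)
      = !((xs.zip (xs.drop 1)).any (fun p => is_operator_b p.1 && is_operator_b p.2)) := by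
  induction xs generalizing k with
  | nil => simp [opPairs, aChain]
  | cons a l ih =>
      cases l with
      | nil =>
          by_cases ha : is_operator a = true <;> simp [opPairs, aChain, ha]
      | cons b t =>
          by_cases ha : is_operator a = true
          · by_cases hb : is_operator b = true
            · -- both operators: A's loop hits an adjacent pair (and the paren test passes)
              have hbp := op_ne_paren b hb
              simp only [opPairs, ha, hb, if_true, aChain]
              rw [if_pos (by simp [hbp.1])]
              simp [is_operator_b_eq, ha, hb]
            · -- a is an operator, b is not: the surviving pairs are ≥ 2 apart
              have hb' : is_operator b = false := by simpa using hb
              rw [show opPairs (a :: b :: t) k = (k, a) :: opPairs t (k + 1 + 1) by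
                    simp [opPairs, ha, hb']]
              have hstep : aChain ((k, a) :: opPairs t (k + 1 + 1)) = aChain (opPairs t (k + 1 + 1)) := by
                cases hL : opPairs t (k + 1 + 1) with
                | nil => simp [aChain]
                | cons q rest =>
                    have hq : k + 1 + 1 ≤ q.1 := opPairs_head_ge t _ q (by simp [hL])
                    simp only [aChain]
                    rw [if_neg]
                    intro hcon
                    have h1 : (q.1 - k == 1) = true := by
                      rcases Bool.and_eq_true_iff.mp hcon with ⟨h1, _⟩
                      exact h1
                    have : q.1 - k = 1 := by simpa using h1
                    omega
              rw [hstep]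
              have ht := ih (k + 1)
              rw [show opPairs (b :: t) (k + 1) = opPairs t (k + 1 + 1) by simp [opPairs, hb']] at ht
              rw [ht]
              simp [is_operator_b_eq, hb']
          · have ha' : is_operator a = false := by simpa using ha
            rw [show opPairs (a :: b :: t) k = opPairs (b :: t) (k + 1) by simp [opPairs, ha']]
            rw [ih (k + 1)]
            simp [is_operator_b_eq, ha']

-- ===== VERDICT (by name: the statement is the Claim_ definition above) =====
theorem is_operator_double_spec : Claim_equal_is_operator_double := by
  intro formula _
  unfold Spec_is_operator_double is_operator_double is_operator_double_alt
  rw [operator_counter_eq, operator_list_eq]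
  simp only [List.length_map]
  rw [allRange_eq_aChain, aChain_opPairs_eq_scan]
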